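-- pv_equiv track=rewrite | github.com/zhuyuanxiang/Learn-to-Pack | learn_to_pack/geometry/geofunc.py | getPolyEdges
-- ===== SOURCE A (Python) =====
-- def getPolyEdges(poly):
--     edges = []
--     for index, point in enumerate(poly):
--         if index < len(poly) - 1:
--             edges.append([poly[index], poly[index + 1]])
--         else:
--             edges.append([poly[index], poly[0]])
--     return edges
-- ===== SOURCE B (Python) =====
-- def getPolyEdges(poly):
--     if not poly:
--         return []
--     edges = []
--     nxt = poly[0]  # the successor of the last vertex is the first vertex
--     for cur in reversed(poly):
--         edges.append([cur, nxt])
--         nxt = cur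
--     edges.reverse()
--     return edges
-- ===== Notes on version B (the rewrite author's own statement) =====
-- stated objective: alternative
-- what changed: Replaces A's forward indexed loop with a wraparound branch by a backward sweep that carries the successor vertex as loop state (seeded with the first vertex to close the cycle) and reverses the accumulated edges at the end.
import Mathlib
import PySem

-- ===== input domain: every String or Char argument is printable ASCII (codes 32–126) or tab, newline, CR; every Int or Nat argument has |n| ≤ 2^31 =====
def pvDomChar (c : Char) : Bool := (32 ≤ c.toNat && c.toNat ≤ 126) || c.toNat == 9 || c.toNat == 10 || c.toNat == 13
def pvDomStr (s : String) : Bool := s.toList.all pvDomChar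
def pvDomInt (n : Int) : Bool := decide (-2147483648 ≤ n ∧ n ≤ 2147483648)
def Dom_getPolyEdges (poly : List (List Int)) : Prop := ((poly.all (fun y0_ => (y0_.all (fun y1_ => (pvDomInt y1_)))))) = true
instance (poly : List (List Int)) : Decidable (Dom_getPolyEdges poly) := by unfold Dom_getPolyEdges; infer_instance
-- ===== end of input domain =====

-- B replaces A's forward indexed loop with a wraparound branch by a backward sweep that
-- carries the successor vertex as state and reverses the result; return values proved equal.

-- ===== PORT A =====
def getPolyEdges (poly : List (List Int)) : List (List (List Int)) :=
  (PySem.List.enumerate poly 0).foldl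
    (fun edges ip =>
      if ip.1 < (poly.length : Int) - 1 then
        edges ++ [[(PySem.List.pyGet? poly ip.1).getD [], (PySem.List.pyGet? poly (ip.1 + 1)).getD []]]
      else
        edges ++ [[(PySem.List.pyGet? poly ip.1).getD [], (PySem.List.pyGet? poly 0).getD []]])
    []

-- ===== PORT B =====
def getPolyEdges_alt (poly : List (List Int)) : List (List (List Int)) :=
  match poly with
  | [] => []
  | p :: _ =>
    let r := poly.reverse.foldl
      (fun (st : List (List (List Int)) × List Int) cur => (st.1 ++ [[cur, st.2]], cur))
      ([], p)
    r.1.reverse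

-- ===== PRECONDITION & SPEC =====
def Spec_getPolyEdges (poly : List (List Int)) (out : List (List (List Int))) : Prop := out = getPolyEdges_alt poly
instance (poly : List (List Int)) (out : List (List (List Int))) : Decidable (Spec_getPolyEdges poly out) := by unfold Spec_getPolyEdges; infer_instance

-- ===== CLAIM (what is proved, stated in full; the proofs are below) =====
def Claim_equal_getPolyEdges : Prop := ∀ (poly : List (List Int)), Dom_getPolyEdges poly → Spec_getPolyEdges poly (getPolyEdges poly)

-- ===== LEMMAS AND PROOFS =====

theorem foldl_ite_append {α β : Type} (p : α → Prop) [DecidablePred p]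
    (f g : α → β) (l : List α) (acc : List β) :
    l.foldl (fun acc x => if p x then acc ++ [f x] else acc ++ [g x]) acc
      = acc ++ l.map (fun x => if p x then f x else g x) := by
  induction l generalizing acc with
  | nil => simp
  | cons x xs ih => simp only [List.foldl_cons, List.map_cons, ih]; split <;> simp

theorem getPolyEdges_eq_map (poly : List (List Int)) :
    getPolyEdges poly =
      (PySem.List.enumerate poly 0).map (fun ip =>
        if ip.1 < (poly.length : Int) - 1 then
          [(PySem.List.pyGet? poly ip.1).getD [], (PySem.List.pyGet? poly (ip.1 + 1)).getD []]
        else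
          [(PySem.List.pyGet? poly ip.1).getD [], (PySem.List.pyGet? poly 0).getD []]) := by
  unfold getPolyEdges
  rw [foldl_ite_append]
  simp

-- A's map-over-enumerate form equals the zip-with-rotation form (intermediate characterisation).
theorem getPolyEdges_eq_zip (poly : List (List Int)) :
    getPolyEdges poly =
      (poly.zip (poly.drop 1 ++ poly.take 1)).map (fun pair => [pair.1, pair.2]) := by
  rw [getPolyEdges_eq_map]
  apply List.ext_getElem
  · simp
    omega
  · intro k hk1 hk2
    have hk : k < poly.length := by
      rw [List.length_map, PySem.List.length_enumerate] at hk1; exact hk1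
    rw [List.getElem_map, List.getElem_map, PySem.List.getElem_enumerate]
    rw [List.getElem_zip]
    have hget : PySem.List.pyGet? poly ((0:Int) + (k:Int)) = some poly[k] := by
      rw [zero_add, PySem.List.pyGet?_natCast, List.getElem?_eq_getElem hk]
    by_cases hlt : (k:Int) < (poly.length : Int) - 1
    · have hk1' : k + 1 < poly.length := by omega
      have hget2 : PySem.List.pyGet? poly ((0:Int) + (k:Int) + 1) = some poly[k+1] := by
        have : (0:Int) + (k:Int) + 1 = ((k+1 : Nat) : Int) := by push_cast; ring
        rw [this, PySem.List.pyGet?_natCast, List.getElem?_eq_getElem hk1']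
      have hdrop : k < (poly.drop 1).length := by simp; omega
      rw [if_pos (by simpa using hlt), hget, hget2,
        List.getElem_append_left hdrop, List.getElem_drop]
      simp only [Option.getD_some]
      have hidx : k + 1 = 1 + k := Nat.add_comm k 1
      exact congrArg (fun e => [poly[k], e]) (by simp only [hidx])
    · have hkeq : k = poly.length - 1 := by omega
      have hpos : 0 < poly.length := by omega
      have hget0 : PySem.List.pyGet? poly 0 = some poly[0] := by
        rw [PySem.List.pyGet?_zero, List.getElem?_eq_getElem hpos]
      have hge : (poly.drop 1).length ≤ k := by simp; omega
      rw [if_neg (by simpa using hlt), hget, hget0,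
        List.getElem_append_right hge]
      have : k - (poly.drop 1).length = 0 := by simp; omega
      simp only [this]
      have h0 : poly.take 1 = [poly[0]] := by
        cases poly with
        | nil => simp at hpos
        | cons a l => simp
      simp [h0]

-- B's backward fold emits the pair (cur, carried successor) at each step.
theorem pvFoldB_eq_zip (m : List (List Int)) (acc : List (List (List Int))) (nxt : List Int) :
    (m.foldl
      (fun (st : List (List (List Int)) × List Int) cur => (st.1 ++ [[cur, st.2]], cur))
      (acc, nxt)).1
      = acc ++ (m.zip (nxt :: m)).map (fun pair => [pair.1, pair.2]) := by
  induction m generalizing acc nxt with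
  | nil => simp
  | cons c cs ih => simp [ih]

-- Reversing the backward zip pairing yields the forward zip-with-rotation pairing.
theorem pvZipRev (l : List (List Int)) (x : List Int) :
    (l.reverse.zip (x :: l.reverse)).reverse = l.zip (l.drop 1 ++ [x]) := by
  apply List.ext_getElem
  · simp [List.length_zip]
    omega
  · intro k hk1 hk2
    have hn : k < l.length := by simp [List.length_zip] at hk1; omega
    have hlen : (l.reverse.zip (x :: l.reverse)).length = l.length := by
      simp [List.length_zip]
    rw [List.getElem_reverse, List.getElem_zip, List.getElem_zip]
    simp only [List.length_zip, List.length_reverse, List.length_cons]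
    have hm : min l.length (l.length + 1) = l.length := by omega
    simp only [hm]
    have hrev : l.reverse[l.length - 1 - k]'(by simp; omega) = l[k]'hn := by
      rw [List.getElem_reverse]
      congr 1
      omega
    simp only [Prod.mk.injEq]
    refine ⟨hrev, ?_⟩
    by_cases hlast : k = l.length - 1
    · have h0 : l.length - 1 - k = 0 := by omega
      simp only [h0, List.getElem_cons_zero]
      have : (l.drop 1).length ≤ k := by simp; omega
      rw [List.getElem_append_right this]
      simp
    · have hpos : 0 < l.length - 1 - k := by omega
      have hcons : (x :: l.reverse)[l.length - 1 - k]'(by simp; omega)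
          = l.reverse[l.length - 1 - k - 1]'(by simp; omega) := by
        have : l.length - 1 - k = (l.length - 2 - k) + 1 := by omega
        simp only [this, List.getElem_cons_succ, Nat.add_sub_cancel]
      rw [hcons, List.getElem_reverse]
      have hk1' : k + 1 < l.length := by omega
      have : l.length - 1 - (l.length - 1 - k - 1) = k + 1 := by omega
      simp only [this]
      have hd : k < (l.drop 1).length := by simp; omega
      rw [List.getElem_append_left hd, List.getElem_drop]
      congr 1
      omega

theorem getPolyEdges_spec_aux (poly : List (List Int)) :
    getPolyEdges poly = getPolyEdges_alt poly := by
  rw [getPolyEdges_eq_zip]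
  cases poly with
  | nil => simp [getPolyEdges_alt]
  | cons p rest =>
    show _ = ((p :: rest).reverse.foldl _ ([], p)).1.reverse
    rw [pvFoldB_eq_zip, List.nil_append, ← List.map_reverse, pvZipRev]
    simp

-- ===== VERDICT (by name: the statement is the Claim_ definition above) =====
theorem getPolyEdges_spec : Claim_equal_getPolyEdges := by
  intro poly _
  exact getPolyEdges_spec_aux poly
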